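-- pv_equiv track=rewrite | github.com/lixiekun/flotherm-automation | pdml_tools/pdml_hierarchy_candidates.py | classify_offset
-- ===== SOURCE A (Python) =====
-- from typing import Any, Dict, Iterable, List, Optional, Sequence, Tuple
--
-- def classify_offset(offset: int, sections: Dict[str, int]) -> str:
--     if not sections:
--         return "unknown"
--
--     ordered = sorted(sections.items(), key=lambda item: item[1])
--     current = ordered[0][0]
--     for name, start in ordered:
--         if offset >= start:
--             current = name
--         else:
--             break
--     return current
-- ===== SOURCE B (Python) =====
-- def classify_offset(offset: int, sections: dict) -> str:
--     best = None      # (name, start) with the largest start <= offset; later entry wins ties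
--     fallback = None  # (name, start) with the smallest start; earlier entry wins ties
--     for name, start in sections.items():
--         if start <= offset and (best is None or start >= best[1]):
--             best = (name, start)
--         if fallback is None or start < fallback[1]:
--             fallback = (name, start)
--     if fallback is None:
--         return "unknown"
--     return (best if best is not None else fallback)[0]
-- ===== Notes on version B (the rewrite author's own statement) =====
-- stated objective: faster
-- what changed: Replaced the sort-then-scan (sort all sections by start, walk the prefix with start <= offset) by a single pass over the original dict keeping the best qualifying start (ties: last entry wins, matching the stable sort) and the minimum start as fallback (ties: first entry wins).
import Mathlib
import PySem

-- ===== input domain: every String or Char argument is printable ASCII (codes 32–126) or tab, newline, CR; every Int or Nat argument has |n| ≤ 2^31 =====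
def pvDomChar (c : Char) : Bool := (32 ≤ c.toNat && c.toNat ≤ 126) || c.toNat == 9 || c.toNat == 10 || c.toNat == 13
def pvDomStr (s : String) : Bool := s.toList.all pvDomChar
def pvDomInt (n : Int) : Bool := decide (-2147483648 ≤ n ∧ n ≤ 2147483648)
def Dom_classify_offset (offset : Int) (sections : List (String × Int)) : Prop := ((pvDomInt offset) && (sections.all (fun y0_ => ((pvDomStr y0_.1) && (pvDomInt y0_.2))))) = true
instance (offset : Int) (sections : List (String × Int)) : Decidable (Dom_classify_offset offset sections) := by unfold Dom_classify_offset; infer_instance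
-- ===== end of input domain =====

-- B replaces A's sort-then-scan by a single pass keeping the best qualifying start and the
-- minimum start as fallback (objective: faster, one O(n) pass instead of a sort).

-- ===== PORT A =====
-- the loop 'for name, start in ordered: if offset >= start: current = name; else: break'
def classifyLoopA (offset : Int) : List (String × Int) → String → String
  | [], current => current
  | (name, start) :: rest, current =>
      if offset ≥ start then classifyLoopA offset rest name else current

def classify_offset (offset : Int) (sections : List (String × Int)) : String :=
  if sections = [] then "unknown"
  else
    let ordered := PySem.List.sorted sections (fun item => item.2) false
    -- ordered[0][0]: ordered is nonempty here, so the default is never used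
    let current := (PySem.List.pyGetD ordered 0 ("", 0)).1
    classifyLoopA offset ordered current

-- ===== PORT B =====
-- 'if start <= offset and (best is None or start >= best[1]): best = (name, start)'
def updBest (offset : Int) (best : Option (String × Int)) (p : String × Int) : Option (String × Int) :=
  match best with
  | none => if p.2 ≤ offset then some p else none
  | some b => if p.2 ≤ offset ∧ p.2 ≥ b.2 then some p else some b

-- 'if fallback is None or start < fallback[1]: fallback = (name, start)'
def updFb (fb : Option (String × Int)) (p : String × Int) : Option (String × Int) :=
  match fb with
  | none => some p
  | some f => if p.2 < f.2 then some p else some f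

def classify_offset_alt (offset : Int) (sections : List (String × Int)) : String :=
  let r := sections.foldl (fun st p => (updBest offset st.1 p, updFb st.2 p)) (none, none)
  match r.2 with
  | none => "unknown"
  | some f =>
    match r.1 with
    | some b => b.1
    | none => f.1

-- ===== PRECONDITION & SPEC =====
def Spec_classify_offset (offset : Int) (sections : List (String × Int)) (out : String) : Prop := out = classify_offset_alt offset sections
instance (offset : Int) (sections : List (String × Int)) (out : String) : Decidable (Spec_classify_offset offset sections out) := by unfold Spec_classify_offset; infer_instance

-- ===== CLAIM (what is proved, stated in full; the proofs are below) =====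
def Claim_equal_classify_offset : Prop := ∀ (offset : Int) (sections : List (String × Int)), Dom_classify_offset offset sections → Spec_classify_offset offset sections (classify_offset offset sections)

-- ===== LEMMAS AND PROOFS =====

-- (a :: l).getLast? made explicit
theorem getLast?_cons_or {α : Type} (a : α) (l : List α) :
    (a :: l).getLast? = (l.getLast?).or (some a) := by
  induction l generalizing a with
  | nil => rfl
  | cons b t ih => rw [List.getLast?_cons_cons, ih b]; cases t.getLast? <;> rfl

-- A's scan with break returns the last element of the qualifying prefix (or 'current')
theorem classifyLoopA_eq (offset : Int) (s : List (String × Int)) (cur : String) :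
    classifyLoopA offset s cur =
      match (s.takeWhile (fun p => decide (p.2 ≤ offset))).getLast? with
      | some b => b.1
      | none => cur := by
  induction s generalizing cur with
  | nil => rfl
  | cons p t ih =>
    obtain ⟨name, start⟩ := p
    by_cases h : start ≤ offset
    · rw [show classifyLoopA offset ((name, start) :: t) cur
            = classifyLoopA offset t name from by
          simp [classifyLoopA, ge_iff_le, h]]
      rw [ih name]
      rw [show ((name, start) :: t).takeWhile (fun p => decide (p.2 ≤ offset))
            = (name, start) :: t.takeWhile (fun p => decide (p.2 ≤ offset)) from by
          simp [h]]
      rw [getLast?_cons_or]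
      cases (t.takeWhile (fun p => decide (p.2 ≤ offset))).getLast? <;> rfl
    · rw [show classifyLoopA offset ((name, start) :: t) cur = cur from by
          simp [classifyLoopA, ge_iff_le, h]]
      simp [h]

-- on a list sorted by start, the qualifying elements form a prefix
theorem filter_eq_takeWhile_of_sorted (offset : Int) (s : List (String × Int))
    (hs : s.Pairwise (fun a b => a.2 ≤ b.2)) :
    s.filter (fun p => decide (p.2 ≤ offset)) = s.takeWhile (fun p => decide (p.2 ≤ offset)) := by
  induction s with
  | nil => rfl
  | cons p t ih =>
    rw [List.pairwise_cons] at hs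
    by_cases h : p.2 ≤ offset
    · simp [h, ih hs.2]
    · simp only [List.filter_cons, List.takeWhile_cons, h, decide_false]
      exact List.filter_eq_nil_iff.mpr (fun b hb => by
        simp only [decide_eq_true_eq]
        exact fun hb2 => h (le_trans (hs.1 b hb) hb2))

-- one insertion step commutes with 'last qualifying element'
theorem insertBy_lastQ (offset : Int) (x : String × Int) (s : List (String × Int))
    (hs : s.Pairwise (fun a b => a.2 ≤ b.2)) :
    ((PySem.List.insertBy (fun a b => decide (a.2 < b.2)) x s).filter
        (fun p => decide (p.2 ≤ offset))).getLast?
      = updBest offset ((s.filter (fun p => decide (p.2 ≤ offset))).getLast?) x := by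
  induction s with
  | nil =>
    by_cases h : x.2 ≤ offset <;> simp [PySem.List.insertBy, updBest, h]
  | cons y t ih =>
    rw [List.pairwise_cons] at hs
    by_cases hxy : x.2 < y.2
    · rw [show PySem.List.insertBy (fun a b => decide (a.2 < b.2)) x (y :: t) = x :: y :: t from by
        simp [PySem.List.insertBy, hxy]]
      by_cases hx : x.2 ≤ offset
      · rw [show (x :: y :: t).filter (fun p => decide (p.2 ≤ offset))
              = x :: (y :: t).filter (fun p => decide (p.2 ≤ offset)) from by
            simp [List.filter_cons, hx]]
        rw [getLast?_cons_or]
        cases hl : ((y :: t).filter (fun p => decide (p.2 ≤ offset))).getLast? with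
        | none => simp [updBest, hx]
        | some b =>
          have hb : b ∈ (y :: t).filter (fun p => decide (p.2 ≤ offset)) :=
            List.mem_of_getLast? hl
          have hb' : b ∈ y :: t := List.mem_of_mem_filter hb
          have hyb : y.2 ≤ b.2 := by
            rcases List.mem_cons.mp hb' with h | h
            · rw [h]
            · exact hs.1 b h
          simp only [Option.or_some]
          have : ¬ (x.2 ≤ offset ∧ x.2 ≥ b.2) := by
            rintro ⟨-, h2⟩; omega
          simp [updBest, this]
      · rw [show (x :: y :: t).filter (fun p => decide (p.2 ≤ offset))
              = (y :: t).filter (fun p => decide (p.2 ≤ offset)) from by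
            simp [List.filter_cons, hx]]
        cases ((y :: t).filter (fun p => decide (p.2 ≤ offset))).getLast? with
        | none => simp [updBest, hx]
        | some b => simp [updBest, hx]
    · rw [show PySem.List.insertBy (fun a b => decide (a.2 < b.2)) x (y :: t)
            = y :: PySem.List.insertBy (fun a b => decide (a.2 < b.2)) x t from by
        simp [PySem.List.insertBy, hxy]]
      by_cases hy : y.2 ≤ offset
      · rw [show (y :: PySem.List.insertBy (fun a b => decide (a.2 < b.2)) x t).filter
                (fun p => decide (p.2 ≤ offset))
              = y :: (PySem.List.insertBy (fun a b => decide (a.2 < b.2)) x t).filter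
                (fun p => decide (p.2 ≤ offset)) from by
            simp [hy]]
        rw [show (y :: t).filter (fun p => decide (p.2 ≤ offset))
              = y :: t.filter (fun p => decide (p.2 ≤ offset)) from by
            simp [hy]]
        rw [getLast?_cons_or, getLast?_cons_or, ih hs.2]
        cases hl : (t.filter (fun p => decide (p.2 ≤ offset))).getLast? with
        | none =>
          by_cases hx : x.2 ≤ offset
          · have : x.2 ≥ y.2 := by omega
            simp [updBest, hx, this]
          · simp [updBest, hx]
        | some b =>
          by_cases hx : x.2 ≤ offset <;> by_cases hxb : x.2 ≥ b.2 <;>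
            simp [updBest, hx, hxb]
      · rw [show (y :: PySem.List.insertBy (fun a b => decide (a.2 < b.2)) x t).filter
                (fun p => decide (p.2 ≤ offset))
              = (PySem.List.insertBy (fun a b => decide (a.2 < b.2)) x t).filter
                (fun p => decide (p.2 ≤ offset)) from by
            simp [hy]]
        rw [show (y :: t).filter (fun p => decide (p.2 ≤ offset))
              = t.filter (fun p => decide (p.2 ≤ offset)) from by
            simp [hy]]
        exact ih hs.2

-- appending one element to the input inserts it into the sorted list
theorem sorted_append_singleton (l : List (String × Int)) (x : String × Int) :
    PySem.List.sorted (l ++ [x]) (fun p => p.2) false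
      = PySem.List.insertBy (fun a b => decide (a.2 < b.2)) x
          (PySem.List.sorted l (fun p => p.2) false) := by
  rw [PySem.List.sorted_eq_foldl_insertBy, PySem.List.sorted_eq_foldl_insertBy,
    List.foldl_append]
  rfl

-- B's best-accumulator over the raw list = last qualifying element of the sorted list
theorem foldl_updBest_eq (offset : Int) (l : List (String × Int)) :
    l.foldl (updBest offset) none
      = ((PySem.List.sorted l (fun p => p.2) false).filter
          (fun p => decide (p.2 ≤ offset))).getLast? := by
  induction l using List.reverseRecOn with
  | nil => rfl
  | append_singleton l x ih =>
    rw [List.foldl_append, sorted_append_singleton]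
    rw [insertBy_lastQ offset x _ (PySem.List.sorted_pairwise l (fun p => p.2)), ← ih]
    rfl

-- one insertion step commutes with 'first element'
theorem insertBy_head? (x : String × Int) (s : List (String × Int)) :
    (PySem.List.insertBy (fun a b => decide (a.2 < b.2)) x s).head?
      = updFb s.head? x := by
  cases s with
  | nil => rfl
  | cons y t =>
    by_cases hxy : x.2 < y.2 <;> simp [PySem.List.insertBy, updFb, hxy]

-- B's fallback-accumulator over the raw list = head of the sorted list
theorem foldl_updFb_eq (l : List (String × Int)) :
    l.foldl updFb none = (PySem.List.sorted l (fun p => p.2) false).head? := by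
  induction l using List.reverseRecOn with
  | nil => rfl
  | append_singleton l x ih =>
    rw [List.foldl_append, sorted_append_singleton, insertBy_head?, ← ih]
    rfl

-- ===== VERDICT (by name: the statement is the Claim_ definition above) =====
theorem classify_offset_spec : Claim_equal_classify_offset := by
  intro offset sections _
  unfold Spec_classify_offset classify_offset classify_offset_alt
  rw [PySem.List.foldl_prod_mk (updBest offset) updFb sections none none]
  by_cases hnil : sections = []
  · subst hnil; rfl
  · simp only [hnil, if_false]
    have hsnil : PySem.List.sorted sections (fun p => p.2) false ≠ [] := by
      simpa [PySem.List.sorted_eq_nil_iff] using hnil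
    obtain ⟨h, t, hht⟩ := List.exists_cons_of_ne_nil hsnil
    rw [foldl_updBest_eq, foldl_updFb_eq, classifyLoopA_eq,
      filter_eq_takeWhile_of_sorted offset _
        (PySem.List.sorted_pairwise sections (fun p => p.2)) |>.symm,
      hht]
    rw [show PySem.List.pyGetD (h :: t) (0 : Int) ("", 0) = h from
      PySem.List.pyGetD_zero_cons h t ("", 0)]
    cases ((h :: t).filter (fun p => decide (p.2 ≤ offset))).getLast? <;> rfl
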